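-- pv_equiv track=rewrite | github.com/dawangran/IsoPrep | IsoPrep/bin/.ipynb_checkpoints/umi_correct_longreads-checkpoint.py | cigar_to_blocks_and_introns
-- ===== SOURCE A (Python) =====
-- def cigar_to_blocks_and_introns(pos0, cigar):
--     """Return exon blocks and introns as 0-based half-open intervals"""
--     ref = pos0
--     blocks = []
--     block_start = ref
--     introns = []
--     for op, ln in cigar or []:
--         # 0M 1I 2D 3N 4S 5H 6P 7= 8X
--         if op in (0,7,8):  # M,=,X
--             ref += ln
--         elif op == 2:      # D
--             ref += ln
--         elif op == 3:      # N (intron)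
--             blocks.append((block_start, ref))
--             s, e = ref, ref + ln
--             introns.append((s, e))
--             ref = e
--             block_start = ref
--         elif op in (1,4,5,6):  # I/S/H/P: no ref advance
--             pass
--     blocks.append((block_start, ref))
--     return blocks, introns
-- ===== SOURCE B (Python) =====
-- def cigar_to_blocks_and_introns(pos0, cigar):
--     """Return exon blocks and introns as 0-based half-open intervals"""
--     ref = pos0
--     introns = []
--     for op, ln in cigar or []:
--         if op == 3:
--             introns.append((ref, ref + ln))
--             ref += ln
--         elif op in (0, 2, 7, 8):
--             ref += ln
--     starts = [pos0] + [e for _, e in introns]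
--     ends = [s for s, _ in introns] + [ref]
--     return list(zip(starts, ends)), introns
-- ===== Notes on version B (the rewrite author's own statement) =====
-- stated objective: alternative
-- what changed: B separates boundary collection from block construction: one loop records only the introns and the final ref cursor, then the exon blocks are built by zipping [pos0]+intron-ends with intron-starts+[ref_end], instead of A's interleaved appends to blocks inside the loop.
import Mathlib
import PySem

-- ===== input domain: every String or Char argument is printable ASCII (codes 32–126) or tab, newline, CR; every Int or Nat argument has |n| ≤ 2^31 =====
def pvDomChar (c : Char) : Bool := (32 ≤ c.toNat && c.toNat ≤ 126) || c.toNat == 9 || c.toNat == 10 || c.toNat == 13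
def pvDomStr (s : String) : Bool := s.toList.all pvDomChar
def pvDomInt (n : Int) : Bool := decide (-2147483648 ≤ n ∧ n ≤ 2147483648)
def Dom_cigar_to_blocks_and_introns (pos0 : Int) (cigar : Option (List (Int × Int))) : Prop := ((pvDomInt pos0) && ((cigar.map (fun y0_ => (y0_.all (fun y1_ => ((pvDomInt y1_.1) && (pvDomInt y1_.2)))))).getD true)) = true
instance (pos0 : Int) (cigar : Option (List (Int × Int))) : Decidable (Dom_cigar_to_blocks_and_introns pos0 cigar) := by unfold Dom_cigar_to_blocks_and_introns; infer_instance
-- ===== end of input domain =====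

-- B separates boundary collection (introns + final ref cursor) from block construction (a zip
-- of the boundary lists), instead of A's interleaved appends inside one loop. Same cost.
-- ===== PORT A =====
-- A's for-loop over the cigar, state (ref, blocks, block_start, introns), appends kept in order.
def pvALoop (ops : List (Int × Int)) (ref : Int) (blocks : List (Int × Int))
    (bstart : Int) (introns : List (Int × Int)) :
    Int × List (Int × Int) × Int × List (Int × Int) :=
  match ops with
  | [] => (ref, blocks, bstart, introns)
  | (op, ln) :: rest =>
    if op = 0 ∨ op = 7 ∨ op = 8 then
      pvALoop rest (ref + ln) blocks bstart introns
    else if op = 2 then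
      pvALoop rest (ref + ln) blocks bstart introns
    else if op = 3 then
      pvALoop rest (ref + ln) (blocks ++ [(bstart, ref)]) (ref + ln) (introns ++ [(ref, ref + ln)])
    else
      pvALoop rest ref blocks bstart introns

def cigar_to_blocks_and_introns (pos0 : Int) (cigar : Option (List (Int × Int))) : (List (Int × Int)) × (List (Int × Int)) :=
  let (ref, blocks, bstart, introns) := pvALoop (cigar.getD []) pos0 [] pos0 []
  (blocks ++ [(bstart, ref)], introns)

-- ===== PORT B =====
-- B's first loop: advance ref on 0/2/3/7/8, record introns on 3; returns (ref_end, introns).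
def pvBLoop (ops : List (Int × Int)) (ref : Int) : Int × List (Int × Int) :=
  match ops with
  | [] => (ref, [])
  | (op, ln) :: rest =>
    if op = 3 then
      let (re, ins) := pvBLoop rest (ref + ln)
      (re, (ref, ref + ln) :: ins)
    else if op = 0 ∨ op = 2 ∨ op = 7 ∨ op = 8 then
      pvBLoop rest (ref + ln)
    else
      pvBLoop rest ref

def cigar_to_blocks_and_introns_alt (pos0 : Int) (cigar : Option (List (Int × Int))) : (List (Int × Int)) × (List (Int × Int)) :=
  let (re, introns) := pvBLoop (cigar.getD []) pos0
  let starts := pos0 :: introns.map Prod.snd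
  let ends := introns.map Prod.fst ++ [re]
  (starts.zip ends, introns)

-- ===== PRECONDITION & SPEC =====
def Spec_cigar_to_blocks_and_introns (pos0 : Int) (cigar : Option (List (Int × Int))) (out : (List (Int × Int)) × (List (Int × Int))) : Prop := out = cigar_to_blocks_and_introns_alt pos0 cigar
instance (pos0 : Int) (cigar : Option (List (Int × Int))) (out : (List (Int × Int)) × (List (Int × Int))) : Decidable (Spec_cigar_to_blocks_and_introns pos0 cigar out) := by unfold Spec_cigar_to_blocks_and_introns; infer_instance

-- ===== CLAIM (what is proved, stated in full; the proofs are below) =====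
def Claim_equal_cigar_to_blocks_and_introns : Prop := ∀ (pos0 : Int) (cigar : Option (List (Int × Int))), Dom_cigar_to_blocks_and_introns pos0 cigar → Spec_cigar_to_blocks_and_introns pos0 cigar (cigar_to_blocks_and_introns pos0 cigar)

-- ===== LEMMAS AND PROOFS =====

-- ===== VERDICT (by name: the statement is the Claim_ definition above) =====
-- last intron end, defaulting to d (proof-side helper)
def pvLastEnd (ins : List (Int × Int)) (d : Int) : Int :=
  match ins with
  | [] => d
  | (_, e) :: t => pvLastEnd t e

-- zip against a snoc'd right list when the left list is one longer
theorem pv_zip_snoc (ins : List (Int × Int)) : ∀ (b z : Int),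
    (b :: ins.map Prod.snd).zip (ins.map Prod.fst ++ [z]) =
      (b :: ins.map Prod.snd).zip (ins.map Prod.fst) ++ [(pvLastEnd ins b, z)] := by
  induction ins with
  | nil => intro b z; simp [pvLastEnd]
  | cons p t ih =>
    intro b z
    obtain ⟨s, e⟩ := p
    simp only [List.map_cons, List.cons_append, List.zip_cons_cons, pvLastEnd, ih e z]

-- A's loop equals B's loop plus the zip reconstruction (loop invariant)
theorem pv_loop_eq (ops : List (Int × Int)) : ∀ (ref bstart : Int)
    (blocks introns : List (Int × Int)),
    pvALoop ops ref blocks bstart introns =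
      ((pvBLoop ops ref).1,
       blocks ++ (bstart :: ((pvBLoop ops ref).2).map Prod.snd).zip (((pvBLoop ops ref).2).map Prod.fst),
       pvLastEnd (pvBLoop ops ref).2 bstart,
       introns ++ (pvBLoop ops ref).2) := by
  induction ops with
  | nil => intro ref bstart blocks introns; simp [pvALoop, pvBLoop, pvLastEnd]
  | cons p rest ih =>
    intro ref bstart blocks introns
    obtain ⟨op, ln⟩ := p
    by_cases h3 : op = 3
    · subst h3
      simp only [pvALoop, pvBLoop]
      norm_num
      rw [ih (ref + ln) (ref + ln) (blocks ++ [(bstart, ref)]) (introns ++ [(ref, ref + ln)])]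
      simp [pvLastEnd, List.append_assoc]
    · by_cases hm : op = 0 ∨ op = 7 ∨ op = 8
      · have hadv : (op = 0 ∨ op = 2 ∨ op = 7 ∨ op = 8) := by tauto
        simp only [pvALoop, pvBLoop, if_pos hm, if_neg h3, if_pos hadv, ih]
      · by_cases h2 : op = 2
        · subst h2
          simp only [pvALoop, pvBLoop]
          norm_num
          exact ih _ _ _ _
        · have hadv : ¬(op = 0 ∨ op = 2 ∨ op = 7 ∨ op = 8) := by tauto
          simp only [pvALoop, pvBLoop, if_neg hm, if_neg h2, if_neg h3, if_neg hadv, ih]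

-- ===== VERDICT (by name: the statement is the Claim_ definition above) =====
theorem cigar_to_blocks_and_introns_spec : Claim_equal_cigar_to_blocks_and_introns := by
  intro pos0 cigar _
  unfold Spec_cigar_to_blocks_and_introns cigar_to_blocks_and_introns cigar_to_blocks_and_introns_alt
  rw [pv_loop_eq]
  simp only [List.nil_append]
  rw [pv_zip_snoc]
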